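-- pv_equiv track=rewrite | github.com/Followingae/analyticsfollowingbackend | app/services/ai/real_visual_content_analyzer.py | _infer_scene_type
-- ===== SOURCE A (Python) =====
-- from typing import Dict, List, Any, Optional, Tuple
--
-- def _infer_scene_type(objects: List[Dict]) -> str:
--     """Infer scene type from detected objects"""
--     # Simple scene classification based on objects
--     # In production, this would be more sophisticated
--     if not objects:
--         return 'unknown'
--
--     # Simple keyword matching (would be more sophisticated in production)
--     object_names = [obj['object'] for obj in objects]
--
--     if any('person' in obj or 'face' in obj for obj in object_names):
--         return 'portrait'
--     elif any('food' in obj or 'drink' in obj for obj in object_names):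
--         return 'food'
--     elif any('outdoor' in obj or 'landscape' in obj for obj in object_names):
--         return 'outdoor'
--     else:
--         return 'general'
-- ===== SOURCE B (Python) =====
-- from typing import Dict, List
--
-- # keyword index -> label; index 6 means "no keyword matched"
-- _KEYWORDS = ('person', 'face', 'food', 'drink', 'outdoor', 'landscape')
-- _LABELS = ('portrait', 'portrait', 'food', 'food', 'outdoor', 'outdoor', 'general')
--
-- def _rank(name: str) -> int:
--     """Index of the first scene keyword contained in name, or 6 if none."""
--     for i, kw in enumerate(_KEYWORDS):
--         if kw in name:
--             return i
--     return 6
--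
-- def _infer_scene_type(objects: List[Dict]) -> str:
--     """Infer scene type by minimising a numeric keyword rank over the names."""
--     if not objects:
--         return 'unknown'
--     object_names = [obj['object'] for obj in objects]
--     best = 6
--     for name in object_names:
--         r = _rank(name)
--         if r < best:
--             best = r
--             if best == 0:
--                 break
--     return _LABELS[best]
-- ===== Notes on version B (the rewrite author's own statement) =====
-- stated objective: alternative
-- what changed: Replaces A's priority if/elif chain of three separate any-scans with an arithmetic encoding: each name is mapped to the index of the first keyword it contains (6 if none), one pass keeps the running minimum rank (early exit at 0), and the label is read from an index table.
import Mathlib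
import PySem

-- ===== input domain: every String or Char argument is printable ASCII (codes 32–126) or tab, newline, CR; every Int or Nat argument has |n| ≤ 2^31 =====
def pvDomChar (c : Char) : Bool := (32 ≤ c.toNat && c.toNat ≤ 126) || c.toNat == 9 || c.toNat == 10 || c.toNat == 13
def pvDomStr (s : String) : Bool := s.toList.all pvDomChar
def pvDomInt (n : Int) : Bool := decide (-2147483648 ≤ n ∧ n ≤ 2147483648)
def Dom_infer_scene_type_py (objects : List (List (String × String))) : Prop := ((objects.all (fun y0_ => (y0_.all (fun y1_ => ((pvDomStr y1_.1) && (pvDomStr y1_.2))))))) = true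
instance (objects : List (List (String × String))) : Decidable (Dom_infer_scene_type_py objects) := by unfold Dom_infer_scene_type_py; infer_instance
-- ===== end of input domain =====

-- B replaces A's priority if/elif chain of three any-scans by an arithmetic encoding:
-- each name gets the index of the first keyword it contains (6 if none), one pass keeps
-- the running minimum, and the label is read from an index table (objective: alternative).

-- obj['object'] : first match in the association list (Python dict lookup); total form,
-- the default is never reached under Pre_ (which excludes the KeyError inputs).
def pyObjGet (obj : List (String × String)) : String :=
  ((obj.find? (fun p => p.1 == "object")).map Prod.snd).getD ""

-- ===== PORT A =====
def infer_scene_type_py (objects : List (List (String × String))) : String :=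
  if objects.isEmpty then "unknown" else
  let object_names := objects.map pyObjGet
  if object_names.any (fun o => PySem.Str.isIn "person" o || PySem.Str.isIn "face" o) then "portrait"
  else if object_names.any (fun o => PySem.Str.isIn "food" o || PySem.Str.isIn "drink" o) then "food"
  else if object_names.any (fun o => PySem.Str.isIn "outdoor" o || PySem.Str.isIn "landscape" o) then "outdoor"
  else "general"

-- ===== PORT B =====
def sceneKeywords : List String := ["person", "face", "food", "drink", "outdoor", "landscape"]
def sceneLabels : List String := ["portrait", "portrait", "food", "food", "outdoor", "outdoor", "general"]

-- B's _rank: index of the first keyword contained in name, 6 if none (= findIdx, which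
-- returns the list's length when no element matches — exactly Python's enumerate loop).
def sceneRank (name : String) : Nat :=
  sceneKeywords.findIdx (fun kw => PySem.Str.isIn kw name)

-- B's loop body; Python's 'break' at best == 0 is modeled by the best = 0 guard
-- (once best is 0 the remaining iterations of the Python loop do not run; the guard
-- makes every later step the identity, so the final value is the same).
def bestStep (best : Nat) (name : String) : Nat :=
  if best = 0 then best
  else (let r := sceneRank name; if r < best then r else best)

def infer_scene_type_py_alt (objects : List (List (String × String))) : String :=
  if objects.isEmpty then "unknown" else
  let object_names := objects.map pyObjGet
  let best := object_names.foldl bestStep 6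
  sceneLabels.getD best "general"

-- ===== PRECONDITION & SPEC =====
-- Pre_ excludes exactly the inputs where obj['object'] raises KeyError: some dict lacks the key "object".
def Pre_infer_scene_type_py (objects : List (List (String × String))) : Prop :=
  (objects.all (fun obj => obj.any (fun p => p.1 == "object"))) = true
instance (objects : List (List (String × String))) : Decidable (Pre_infer_scene_type_py objects) := by unfold Pre_infer_scene_type_py; infer_instance
def pvWitness_infer_scene_type_py : (List (List (String × String))) := [[("object", "person")]]
def Spec_infer_scene_type_py (objects : List (List (String × String))) (out : String) : Prop := out = infer_scene_type_py_alt objects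
instance (objects : List (List (String × String))) (out : String) : Decidable (Spec_infer_scene_type_py objects out) := by unfold Spec_infer_scene_type_py; infer_instance

-- ===== CLAIM (what is proved, stated in full; the proofs are below) =====
def Claim_equal_infer_scene_type_py : Prop := ∀ (objects : List (List (String × String))), Dom_infer_scene_type_py objects → Pre_infer_scene_type_py objects → Spec_infer_scene_type_py objects (infer_scene_type_py objects)

-- ===== LEMMAS AND PROOFS =====

-- the loop step is just a binary min with the rank
theorem bestStep_eq_min (best : Nat) (name : String) :
    bestStep best name = min best (sceneRank name) := by
  unfold bestStep
  dsimp only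
  split_ifs <;> omega

-- per-name characterisations of the rank thresholds
theorem sceneRank_le_one (n : String) :
    decide (sceneRank n ≤ 1) = (PySem.Str.isIn "person" n || PySem.Str.isIn "face" n) := by
  simp only [sceneRank, sceneKeywords, List.findIdx_cons]
  cases h1 : PySem.Str.isIn "person" n <;> cases h2 : PySem.Str.isIn "face" n <;>
    cases h3 : PySem.Str.isIn "food" n <;> cases h4 : PySem.Str.isIn "drink" n <;>
    cases h5 : PySem.Str.isIn "outdoor" n <;> cases h6 : PySem.Str.isIn "landscape" n <;>
    simp [List.findIdx]

theorem sceneRank_le_three (n : String) :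
    decide (sceneRank n ≤ 3) = ((PySem.Str.isIn "person" n || PySem.Str.isIn "face" n)
      || (PySem.Str.isIn "food" n || PySem.Str.isIn "drink" n)) := by
  simp only [sceneRank, sceneKeywords, List.findIdx_cons]
  cases h1 : PySem.Str.isIn "person" n <;> cases h2 : PySem.Str.isIn "face" n <;>
    cases h3 : PySem.Str.isIn "food" n <;> cases h4 : PySem.Str.isIn "drink" n <;>
    cases h5 : PySem.Str.isIn "outdoor" n <;> cases h6 : PySem.Str.isIn "landscape" n <;>
    simp [List.findIdx]

theorem sceneRank_le_five (n : String) :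
    decide (sceneRank n ≤ 5) = ((PySem.Str.isIn "person" n || PySem.Str.isIn "face" n)
      || (PySem.Str.isIn "food" n || PySem.Str.isIn "drink" n)
      || (PySem.Str.isIn "outdoor" n || PySem.Str.isIn "landscape" n)) := by
  simp only [sceneRank, sceneKeywords, List.findIdx_cons]
  cases h1 : PySem.Str.isIn "person" n <;> cases h2 : PySem.Str.isIn "face" n <;>
    cases h3 : PySem.Str.isIn "food" n <;> cases h4 : PySem.Str.isIn "drink" n <;>
    cases h5 : PySem.Str.isIn "outdoor" n <;> cases h6 : PySem.Str.isIn "landscape" n <;>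
    simp [List.findIdx]

-- any distributes over a disjunction of predicates
theorem any_or_distrib (l : List String) (p q : String → Bool) :
    l.any (fun x => p x || q x) = (l.any p || l.any q) := by
  induction l with
  | nil => rfl
  | cons a l ih => simp [ih, Bool.or_assoc, Bool.or_left_comm]

-- the fold stays below the initial accumulator
theorem fold_le_init (names : List String) : ∀ b, names.foldl bestStep b ≤ b := by
  induction names with
  | nil => intro b; simp
  | cons n ns ih =>
    intro b
    calc (n :: ns).foldl bestStep b = ns.foldl bestStep (bestStep b n) := rfl
      _ ≤ bestStep b n := ih _
      _ ≤ b := by rw [bestStep_eq_min]; omega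

-- threshold characterisation of the min-fold
theorem fold_le_iff (k : Nat) (names : List String) :
    ∀ b, (names.foldl bestStep b ≤ k ↔ b ≤ k ∨ names.any (fun n => decide (sceneRank n ≤ k)) = true) := by
  induction names with
  | nil => intro b; simp
  | cons n ns ih =>
    intro b
    rw [List.foldl_cons, ih, bestStep_eq_min, List.any_cons]
    by_cases h : (ns.any fun n => decide (sceneRank n ≤ k)) = true <;>
      simp only [h, Bool.or_true, Bool.or_false, decide_eq_true_eq,
        or_true, or_false, Bool.false_eq_true] <;>
      omega

-- ===== VERDICT (by name: the statement is the Claim_ definition above) =====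
theorem infer_scene_type_py_spec : Claim_equal_infer_scene_type_py := by
  intro objects _ _
  unfold Spec_infer_scene_type_py infer_scene_type_py infer_scene_type_py_alt
  cases objects with
  | nil => rfl
  | cons o os =>
    simp only [List.isEmpty_cons, Bool.false_eq_true, if_false]
    set names := ((o :: os).map pyObjGet) with hnames
    -- translate the rank-threshold anys into A's three any-predicates
    have a1 : (names.any fun n => decide (sceneRank n ≤ 1)) =
        names.any (fun o => PySem.Str.isIn "person" o || PySem.Str.isIn "face" o) := by
      congr 1; funext n; exact sceneRank_le_one n
    have a3 : (names.any fun n => decide (sceneRank n ≤ 3)) =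
        (names.any (fun o => PySem.Str.isIn "person" o || PySem.Str.isIn "face" o)
          || names.any (fun o => PySem.Str.isIn "food" o || PySem.Str.isIn "drink" o)) := by
      rw [← any_or_distrib]; congr 1; funext n; exact sceneRank_le_three n
    have a5 : (names.any fun n => decide (sceneRank n ≤ 5)) =
        ((names.any (fun o => PySem.Str.isIn "person" o || PySem.Str.isIn "face" o)
          || names.any (fun o => PySem.Str.isIn "food" o || PySem.Str.isIn "drink" o))
          || names.any (fun o => PySem.Str.isIn "outdoor" o || PySem.Str.isIn "landscape" o)) := by
      rw [← any_or_distrib, ← any_or_distrib]; congr 1; funext n; exact sceneRank_le_five n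
    have hle6 : names.foldl bestStep 6 ≤ 6 := fold_le_init names 6
    have h1 := fold_le_iff 1 names 6
    have h3 := fold_le_iff 3 names 6
    have h5 := fold_le_iff 5 names 6
    rw [a1] at h1; rw [a3] at h3; rw [a5] at h5
    set R := names.foldl bestStep 6 with hR
    cases e1 : names.any (fun o => PySem.Str.isIn "person" o || PySem.Str.isIn "face" o) <;>
    cases e2 : names.any (fun o => PySem.Str.isIn "food" o || PySem.Str.isIn "drink" o) <;>
    cases e3 : names.any (fun o => PySem.Str.isIn "outdoor" o || PySem.Str.isIn "landscape" o) <;>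
      simp only [e1, e2, e3, Bool.or_false, Bool.or_true, Bool.false_eq_true,
        or_false, or_true, if_true, if_false, Nat.reduceLeDiff, iff_true,
        iff_false] at h1 h3 h5 ⊢ <;>
      interval_cases R <;> first | rfl | omega
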